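-- pv_equiv track=rewrite | github.com/HaoqidexiaoWill/TextClassify | metric.py | is_valid_query
-- ===== SOURCE A (Python) =====
-- def is_valid_query(each_answer):
--     # 计算指标的时候对答案标签的合法性进行判断避免除0
--     num_pos = 0
--     num_neg = 0
--     for label, score in each_answer:
--         if label > 0:
--             num_pos += 1
--         else:
--             num_neg += 1
--     if num_pos > 0 and num_neg > 0:
--         return True
--     else:
--         return False
-- ===== SOURCE B (Python) =====
-- def is_valid_query(each_answer):
--     return any(label > 0 for label, _ in each_answer) and \
--            any(label <= 0 for label, _ in each_answer)
-- ===== Notes on version B (the rewrite author's own statement) =====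
-- stated objective: idiomatic
-- what changed: Replaces the single counting pass with two counters and a final guard by two staged short-circuit existence scans: any(label > 0) and any(label <= 0), maintaining no state at all.
import Mathlib
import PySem

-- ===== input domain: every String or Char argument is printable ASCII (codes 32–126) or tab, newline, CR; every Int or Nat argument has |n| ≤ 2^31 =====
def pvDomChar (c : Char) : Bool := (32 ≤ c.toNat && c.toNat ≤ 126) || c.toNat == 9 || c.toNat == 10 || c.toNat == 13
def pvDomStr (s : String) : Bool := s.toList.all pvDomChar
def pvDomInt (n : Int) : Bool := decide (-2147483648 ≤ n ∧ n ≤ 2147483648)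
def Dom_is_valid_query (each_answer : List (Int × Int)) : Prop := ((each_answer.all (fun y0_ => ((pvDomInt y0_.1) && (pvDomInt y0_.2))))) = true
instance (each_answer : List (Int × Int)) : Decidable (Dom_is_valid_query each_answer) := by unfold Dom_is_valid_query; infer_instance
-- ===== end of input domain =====

-- B replaces A's single counting pass (two counters + final guard) by two staged
-- short-circuit existence scans any(label > 0) and any(label <= 0); objective: idiomatic.

-- ===== PORT A =====
-- the for-loop over (label, score) with the two counters num_pos / num_neg
def is_valid_query (each_answer : List (Int × Int)) : Bool :=
  let st := each_answer.foldl
    (fun (st : Int × Int) p =>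
      if p.1 > 0 then (st.1 + 1, st.2) else (st.1, st.2 + 1))
    (0, 0)
  if st.1 > 0 ∧ st.2 > 0 then true else false

-- ===== PORT B =====
-- any(label > 0 ...) and any(label <= 0 ...): two separate short-circuit scans
def is_valid_query_alt (each_answer : List (Int × Int)) : Bool :=
  each_answer.any (fun p => decide (p.1 > 0)) &&
  each_answer.any (fun p => decide (p.1 ≤ 0))

-- ===== PRECONDITION & SPEC =====
def Spec_is_valid_query (each_answer : List (Int × Int)) (out : Bool) : Prop := out = is_valid_query_alt each_answer
instance (each_answer : List (Int × Int)) (out : Bool) : Decidable (Spec_is_valid_query each_answer out) := by unfold Spec_is_valid_query; infer_instance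

-- ===== CLAIM (what is proved, stated in full; the proofs are below) =====
def Claim_equal_is_valid_query : Prop := ∀ (each_answer : List (Int × Int)), Dom_is_valid_query each_answer → Spec_is_valid_query each_answer (is_valid_query each_answer)

-- ===== LEMMAS AND PROOFS =====

-- A's loop just adds the two counts to the accumulator
lemma foldl_counts (l : List (Int × Int)) (p n : Int) :
    l.foldl (fun (st : Int × Int) q =>
        if q.1 > 0 then (st.1 + 1, st.2) else (st.1, st.2 + 1)) (p, n)
    = (p + (l.countP (fun q => decide (q.1 > 0)) : Int),
       n + (l.countP (fun q => !decide (q.1 > 0)) : Int)) := by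
  induction l generalizing p n with
  | nil => simp
  | cons x xs ih =>
    simp only [List.foldl_cons, List.countP_cons]
    by_cases h : x.1 > 0 <;> simp [h, ih] <;> ring_nf

-- A's counters are positive exactly when such a label exists
lemma a_iff (l : List (Int × Int)) :
    is_valid_query l = true ↔
      ((∃ q ∈ l, q.1 > 0) ∧ (∃ q ∈ l, q.1 ≤ 0)) := by
  unfold is_valid_query
  simp only [foldl_counts, zero_add]
  have hp : ((l.countP (fun q => decide (q.1 > 0)) : Int) > 0) ↔ ∃ q ∈ l, q.1 > 0 := by
    rw [gt_iff_lt, Int.natCast_pos, List.countP_pos_iff]; simp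
  have hn : ((l.countP (fun q => !decide (q.1 > 0)) : Int) > 0) ↔ ∃ q ∈ l, q.1 ≤ 0 := by
    rw [gt_iff_lt, Int.natCast_pos, List.countP_pos_iff]; simp [not_lt]
  split_ifs with h
  · simp only [true_iff]
    exact ⟨hp.mp h.1, hn.mp h.2⟩
  · simp only [false_iff]
    rintro ⟨h1, h2⟩
    exact h ⟨hp.mpr h1, hn.mpr h2⟩

-- B's two any-scans say exactly the same two existences
lemma alt_iff (l : List (Int × Int)) :
    is_valid_query_alt l = true ↔
      ((∃ q ∈ l, q.1 > 0) ∧ (∃ q ∈ l, q.1 ≤ 0)) := by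
  unfold is_valid_query_alt
  simp [List.any_eq_true]

-- ===== VERDICT (by name: the statement is the Claim_ definition above) =====
theorem is_valid_query_spec : Claim_equal_is_valid_query := by
  intro l _
  unfold Spec_is_valid_query
  exact Bool.eq_iff_iff.mpr ((a_iff l).trans (alt_iff l).symm)
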